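-- pv_equiv track=rewrite | github.com/UncleGedd/datathon_c17 | satUtils.py | getQualFromMonth
-- ===== SOURCE A (Python) =====
-- def getQualFromMonth(pilot, month, monthNames, pilots):
--     pilotMonthQuals = pilots[pilot]["Quals"]
--     # If explicitly defined, return it
--     if pilotMonthQuals.get(month):
--         return pilotMonthQuals[month]
--     # Otherwise, return first qualification or a later one that overrides it, if the later one is >= month
--     returnFirst = False
--     lastSeen = None
--     for monthName in monthNames:
--         if pilotMonthQuals.get(monthName):
--             qual = pilotMonthQuals[monthName]
--             if returnFirst:
--                 return qual
--             lastSeen = qual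
--         if month == monthName:
--             if lastSeen:
--                 return lastSeen
--             returnFirst = True
-- ===== SOURCE B (Python) =====
-- def getQualFromMonth(pilot, month, monthNames, pilots):
--     quals = pilots[pilot]["Quals"]
--     q = quals.get(month)
--     if q:
--         return q
--     if month not in monthNames:
--         return None
--     idx = monthNames.index(month)
--     # nearest prior defined (truthy) qualification
--     for name in reversed(monthNames[:idx]):
--         q = quals.get(name)
--         if q:
--             return q
--     # otherwise the first defined qualification after the month
--     for name in monthNames[idx + 1:]:
--         q = quals.get(name)
--         if q:
--             return q
--     return None
-- ===== Notes on version B (the rewrite author's own statement) =====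
-- stated objective: simpler
-- what changed: Replaces A's single stateful scan (returnFirst flag + lastSeen accumulator) by an index-based decomposition: locate the month, scan the prefix backward for the nearest prior truthy qualification, else scan the suffix forward for the first truthy one.
import Mathlib
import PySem

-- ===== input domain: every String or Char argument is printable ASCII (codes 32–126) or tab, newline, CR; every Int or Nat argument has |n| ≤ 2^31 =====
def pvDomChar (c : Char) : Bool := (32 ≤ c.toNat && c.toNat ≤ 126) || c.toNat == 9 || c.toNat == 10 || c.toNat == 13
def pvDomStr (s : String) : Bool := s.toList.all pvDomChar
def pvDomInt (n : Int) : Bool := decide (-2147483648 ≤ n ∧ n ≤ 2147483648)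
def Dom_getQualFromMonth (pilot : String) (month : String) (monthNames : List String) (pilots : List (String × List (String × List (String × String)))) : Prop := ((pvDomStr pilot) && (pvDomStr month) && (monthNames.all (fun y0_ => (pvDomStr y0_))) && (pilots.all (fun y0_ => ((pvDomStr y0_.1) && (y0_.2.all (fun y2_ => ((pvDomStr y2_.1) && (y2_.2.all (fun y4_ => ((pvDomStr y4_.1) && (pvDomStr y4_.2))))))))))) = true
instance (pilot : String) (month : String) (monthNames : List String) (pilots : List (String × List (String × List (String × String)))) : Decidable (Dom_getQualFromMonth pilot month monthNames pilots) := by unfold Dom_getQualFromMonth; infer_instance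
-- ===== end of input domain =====

-- B replaces A's single stateful scan (returnFirst flag + lastSeen accumulator) by an
-- index-based decomposition: backward scan of the prefix, then forward scan of the suffix.


-- Python truthiness of an Optional[str]: None and "" are falsy
def pvTruthy (o : Option String) : Bool := (o.getD "") != ""

-- ===== PORT A =====
-- A's for-loop over monthNames with mutable state (returnFirst, lastSeen)
def pvLoopA (d : List (String × String)) (month : String) :
    List String → Bool → Option String → Option String
  | [], _, _ => none
  | m :: rest, rf, ls =>
    if pvTruthy (List.lookup m d) then
      if rf then List.lookup m d
      else
        let ls' := List.lookup m d
        if month == m then (if pvTruthy ls' then ls' else pvLoopA d month rest true ls')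
        else pvLoopA d month rest rf ls'
    else
      if month == m then (if pvTruthy ls then ls else pvLoopA d month rest true ls)
      else pvLoopA d month rest rf ls

def getQualFromMonth (pilot : String) (month : String) (monthNames : List String) (pilots : List (String × List (String × List (String × String)))) : Option String :=
  match (List.lookup pilot pilots).bind (fun p => List.lookup "Quals" p) with
  | none => none   -- Python raises KeyError here; excluded by Pre_
  | some d =>
    if pvTruthy (List.lookup month d) then List.lookup month d
    else pvLoopA d month monthNames false none

-- ===== PORT B =====
-- first truthy qualification along a list of month names
def pvScanFirst (d : List (String × String)) : List String → Option String
  | [] => none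
  | m :: rest => if pvTruthy (List.lookup m d) then List.lookup m d else pvScanFirst d rest

def getQualFromMonth_alt (pilot : String) (month : String) (monthNames : List String) (pilots : List (String × List (String × List (String × String)))) : Option String :=
  match (List.lookup pilot pilots).bind (fun p => List.lookup "Quals" p) with
  | none => none   -- Python raises KeyError here; excluded by Pre_
  | some d =>
    let q := List.lookup month d
    if pvTruthy q then q
    else
      match PySem.List.index? monthNames month with
      | none => none   -- 'month not in monthNames'
      | some idx =>
        (pvScanFirst d ((monthNames.take idx).reverse)).orElse
          (fun _ => pvScanFirst d (monthNames.drop (idx + 1)))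

-- ===== PRECONDITION & SPEC =====
-- Pre_ excludes exactly the inputs where Python A raises KeyError: pilot missing from
-- pilots, or "Quals" missing from its record (B raises there too).
def Pre_getQualFromMonth (pilot : String) (month : String) (monthNames : List String) (pilots : List (String × List (String × List (String × String)))) : Prop :=
  ((List.lookup pilot pilots).bind (fun p => List.lookup "Quals" p)).isSome = true
instance (pilot : String) (month : String) (monthNames : List String) (pilots : List (String × List (String × List (String × String)))) : Decidable (Pre_getQualFromMonth pilot month monthNames pilots) := by unfold Pre_getQualFromMonth; infer_instance

def pvWitness_getQualFromMonth : String × String × List String × (List (String × List (String × List (String × String)))) :=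
  ("p", "Jan", ["Jan", "Feb"], [("p", [("Quals", [("Feb", "Q1")])])])

def Spec_getQualFromMonth (pilot : String) (month : String) (monthNames : List String) (pilots : List (String × List (String × List (String × String)))) (out : Option String) : Prop := out = getQualFromMonth_alt pilot month monthNames pilots
instance (pilot : String) (month : String) (monthNames : List String) (pilots : List (String × List (String × List (String × String)))) (out : Option String) : Decidable (Spec_getQualFromMonth pilot month monthNames pilots out) := by unfold Spec_getQualFromMonth; infer_instance

-- ===== CLAIM (what is proved, stated in full; the proofs are below) =====
def Claim_equal_getQualFromMonth : Prop := ∀ (pilot : String) (month : String) (monthNames : List String) (pilots : List (String × List (String × List (String × String)))), Dom_getQualFromMonth pilot month monthNames pilots → Pre_getQualFromMonth pilot month monthNames pilots → Spec_getQualFromMonth pilot month monthNames pilots (getQualFromMonth pilot month monthNames pilots)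

-- ===== LEMMAS AND PROOFS =====

theorem pvTruthy_some {o : Option String} (h : pvTruthy o = true) : ∃ s, o = some s := by
  cases o with
  | none => simp [pvTruthy] at h
  | some s => exact ⟨s, rfl⟩

theorem pvScanFirst_append (d : List (String × String)) (xs ys : List String) :
    pvScanFirst d (xs ++ ys) = (pvScanFirst d xs).orElse (fun _ => pvScanFirst d ys) := by
  induction xs with
  | nil => simp [pvScanFirst]
  | cons m rest ih =>
    by_cases h : pvTruthy (List.lookup m d) = true
    · obtain ⟨s, hs⟩ := pvTruthy_some h
      have hts : pvTruthy (some s) = true := hs ▸ h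
      simp [pvScanFirst, hs, hts]
    · simp [pvScanFirst, h, ih]

-- once returnFirst is true (and lastSeen falsy), A's loop is the forward scan
theorem pvLoopA_rf (d : List (String × String)) (month : String) (ms : List String)
    (ls : Option String) (hls : pvTruthy ls = false) :
    pvLoopA d month ms true ls = pvScanFirst d ms := by
  induction ms with
  | nil => rfl
  | cons m rest ih =>
    by_cases h : pvTruthy (List.lookup m d) = true
    · simp [pvLoopA, pvScanFirst, h]
    · simp only [pvLoopA, pvScanFirst, h, Bool.false_eq_true, if_false]
      by_cases hm : (month == m) = true
      · simp [hm, hls, ih]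
      · simp [hm, ih]

-- with a truthy lastSeen, A's loop is: nearest truthy in the prefix before month, else lastSeen
theorem pvLoopA_some (d : List (String × String)) (month : String)
    (hq : pvTruthy (List.lookup month d) = false) (ms : List String) :
    ∀ ls : Option String, pvTruthy ls = true →
    pvLoopA d month ms false ls =
      (match PySem.List.index? ms month with
       | none => none
       | some i => (pvScanFirst d ((ms.take i).reverse)).orElse (fun _ => ls)) := by
  induction ms with
  | nil => intro ls _; rfl
  | cons m rest ih =>
    intro ls hls
    by_cases hm : (month == m) = true
    · have hme : month = m := by simpa using hm
      rw [← hme]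
      rw [PySem.List.index?_cons_self]
      obtain ⟨s, hs⟩ := pvTruthy_some hls
      have hts : pvTruthy (some s) = true := hs ▸ hls
      simp [pvLoopA, hq, hs, hts, pvScanFirst]
    · have hne : m ≠ month := fun h => hm (by simp [h])
      rw [PySem.List.index?_cons_of_ne rest hne]
      by_cases h : pvTruthy (List.lookup m d) = true
      · simp only [pvLoopA, h, if_true, Bool.false_eq_true, if_false, hm]
        rw [ih (List.lookup m d) h]
        cases hidx : PySem.List.index? rest month with
        | none => simp
        | some i =>
          simp only [Option.map_some]
          obtain ⟨s, hs⟩ := pvTruthy_some h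
          have hts : pvTruthy (some s) = true := hs ▸ h
          have htk : (m :: rest).take (i + 1) = m :: rest.take i := rfl
          rw [htk]
          simp only [List.reverse_cons, pvScanFirst_append]
          obtain ⟨t, ht⟩ := pvTruthy_some hls
          simp [pvScanFirst, hs, hts, ht]
      · simp only [pvLoopA, h, Bool.false_eq_true, if_false, hm]
        rw [ih ls hls]
        cases hidx : PySem.List.index? rest month with
        | none => simp
        | some i =>
          simp only [Option.map_some]
          have : (m :: rest).take (i + 1) = m :: rest.take i := rfl
          rw [this]
          simp only [List.reverse_cons, pvScanFirst_append]
          simp [pvScanFirst, h]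

-- from the initial state, A's loop equals B's backward-then-forward decomposition
theorem pvLoopA_none (d : List (String × String)) (month : String)
    (hq : pvTruthy (List.lookup month d) = false) (ms : List String) :
    ∀ ls : Option String, pvTruthy ls = false →
    pvLoopA d month ms false ls =
      (match PySem.List.index? ms month with
       | none => none
       | some i => (pvScanFirst d ((ms.take i).reverse)).orElse
                     (fun _ => pvScanFirst d (ms.drop (i + 1)))) := by
  induction ms with
  | nil => intro ls _; rfl
  | cons m rest ih =>
    intro ls hls
    by_cases hm : (month == m) = true
    · have hme : month = m := by simpa using hm
      rw [← hme]
      rw [PySem.List.index?_cons_self]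
      have hqm : pvTruthy (List.lookup month d) = false := hq
      simp only [pvLoopA, hqm, Bool.false_eq_true, if_false, BEq.rfl, if_true, hls]
      rw [pvLoopA_rf d month rest ls hls]
      simp [pvScanFirst]
    · have hne : m ≠ month := fun h => hm (by simp [h])
      rw [PySem.List.index?_cons_of_ne rest hne]
      by_cases h : pvTruthy (List.lookup m d) = true
      · simp only [pvLoopA, h, if_true, Bool.false_eq_true, if_false, hm]
        rw [pvLoopA_some d month hq rest (List.lookup m d) h]
        cases hidx : PySem.List.index? rest month with
        | none => simp
        | some i =>
          simp only [Option.map_some]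
          obtain ⟨s, hs⟩ := pvTruthy_some h
          have hts : pvTruthy (some s) = true := hs ▸ h
          have htk : (m :: rest).take (i + 1) = m :: rest.take i := rfl
          rw [htk]
          simp only [List.reverse_cons, pvScanFirst_append]
          simp [pvScanFirst, hs, hts, List.drop]
      · simp only [pvLoopA, h, Bool.false_eq_true, if_false, hm]
        rw [ih ls hls]
        cases hidx : PySem.List.index? rest month with
        | none => simp
        | some i =>
          simp only [Option.map_some]
          have : (m :: rest).take (i + 1) = m :: rest.take i := rfl
          rw [this]
          simp only [List.reverse_cons, pvScanFirst_append]
          simp [pvScanFirst, h, List.drop]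

-- ===== VERDICT (by name: the statement is the Claim_ definition above) =====
theorem getQualFromMonth_spec : Claim_equal_getQualFromMonth := by
  intro pilot month monthNames pilots _ hpre
  unfold Spec_getQualFromMonth getQualFromMonth getQualFromMonth_alt
  cases hd : (List.lookup pilot pilots).bind (fun p => List.lookup "Quals" p) with
  | none => simp [Pre_getQualFromMonth, hd] at hpre
  | some d =>
    by_cases hq : pvTruthy (List.lookup month d) = true
    · simp [hq]
    · simp only [hq, Bool.false_eq_true, if_false]
      rw [pvLoopA_none d month (by simpa using hq) monthNames none rfl]
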